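-- pv_equiv track=rewrite | github.com/Nobregaigor/FEBio-Python-OLDVERSION | modules/functions/make_pickle.py | includeNodeNumberInHeader
-- ===== SOURCE A (Python) =====
-- def includeNodeNumberInHeader(header):
-- 	clock = 0
-- 	counter = 0
-- 	new_header = []
-- 	for _ in range(8):
-- 		for i in range(len(header)):
-- 			if clock == 0:
-- 				counter += 1
-- 			new_header.append(header[i] + "_" + str(counter))
--
-- 			clock = clock + 1 if clock < 2 else 0
-- 	return new_header
-- ===== SOURCE B (Python) =====
-- def includeNodeNumberInHeader(header):
--     n = len(header)
--     return [header[j % n] + "_" + str(j // 3 + 1) for j in range(8 * n)]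
-- ===== Notes on version B (the rewrite author's own statement) =====
-- stated objective: simpler
-- what changed: Replaces the clock/counter state machine with nested loops by a single flat comprehension over j in range(8*n), computing the element as header[j % n] and the suffix in closed form as j//3 + 1.
import Mathlib
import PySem

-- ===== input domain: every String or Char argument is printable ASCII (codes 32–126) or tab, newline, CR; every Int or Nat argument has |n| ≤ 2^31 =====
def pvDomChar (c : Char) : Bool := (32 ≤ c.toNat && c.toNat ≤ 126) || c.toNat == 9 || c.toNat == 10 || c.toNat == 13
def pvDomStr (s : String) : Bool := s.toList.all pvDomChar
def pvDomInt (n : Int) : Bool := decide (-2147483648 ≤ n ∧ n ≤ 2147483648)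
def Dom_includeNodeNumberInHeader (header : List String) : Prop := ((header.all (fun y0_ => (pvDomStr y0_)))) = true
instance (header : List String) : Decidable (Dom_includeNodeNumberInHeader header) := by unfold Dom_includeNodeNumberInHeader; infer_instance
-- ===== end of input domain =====

-- B replaces A's nested loops with mutable clock/counter state by one flat comprehension
-- with the closed-form suffix j // 3 + 1 (objective: simpler).

-- ===== PORT A =====
-- One step of the inner loop body: state (clock, counter, new_header), index i.
-- header[i] with i in range(len(header)) is always in range, so List.getD is exact here.
def pvStepA (header : List String) (st : Int × Int × List String) (i : Nat) :
    Int × Int × List String :=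
  let clock := st.1
  let counter := if clock = 0 then st.2.1 + 1 else st.2.1
  let acc := st.2.2 ++ [header.getD i "" ++ "_" ++ PySem.Int.toStr counter]
  let clock' := if clock < 2 then clock + 1 else 0
  (clock', counter, acc)

def includeNodeNumberInHeader (header : List String) : List String :=
  let st :=
    (List.range 8).foldl
      (fun st _ => (List.range header.length).foldl (pvStepA header) st)
      (0, 0, [])
  st.2.2

-- ===== PORT B =====
def includeNodeNumberInHeader_alt (header : List String) : List String :=
  let n := header.length
  (List.range (8 * n)).map
    (fun j => header.getD (j % n) "" ++ "_" ++ PySem.Int.toStr (PySem.Int.floordiv (j : Int) 3 + 1))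

-- ===== PRECONDITION & SPEC =====
def Spec_includeNodeNumberInHeader (header : List String) (out : List String) : Prop := out = includeNodeNumberInHeader_alt header
instance (header : List String) (out : List String) : Decidable (Spec_includeNodeNumberInHeader header out) := by unfold Spec_includeNodeNumberInHeader; infer_instance

-- ===== CLAIM (what is proved, stated in full; the proofs are below) =====
def Claim_equal_includeNodeNumberInHeader : Prop := ∀ (header : List String), Dom_includeNodeNumberInHeader header → Spec_includeNodeNumberInHeader header (includeNodeNumberInHeader header)

-- ===== LEMMAS AND PROOFS =====

-- Invariant: before processing global item number j, A's state is
-- clock = j % 3, counter = (j+2)/3, and the inner loop appends one block.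
theorem pvInnerA (header : List String) (m j : Nat) (acc : List String) :
    (List.range m).foldl (pvStepA header)
      (((j % 3 : Nat) : Int), (((j + 2) / 3 : Nat) : Int), acc)
    = ((((j + m) % 3 : Nat) : Int), (((j + m + 2) / 3 : Nat) : Int),
       acc ++ (List.range m).map
         (fun i => header.getD i "" ++ "_" ++ PySem.Int.toStr ((((j + i) / 3 + 1 : Nat)) : Int))) := by
  induction m with
  | zero => simp
  | succ m ih =>
    rw [List.range_succ, List.foldl_append, ih]
    simp only [List.foldl_cons, List.foldl_nil, pvStepA, List.map_append, List.map_cons,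
      List.map_nil, List.append_assoc]
    have hcnt : (if (((j + m) % 3 : Nat) : Int) = 0
        then (((j + m + 2) / 3 : Nat) : Int) + 1 else (((j + m + 2) / 3 : Nat) : Int))
        = (((j + m) / 3 + 1 : Nat) : Int) := by
      split_ifs with h
      · have : (j + m) % 3 = 0 := by exact_mod_cast h
        omega
      · have : ¬ (j + m) % 3 = 0 := by exact_mod_cast h
        omega
    rw [hcnt]
    simp only [Prod.mk.injEq]
    refine ⟨?_, ?_, ?_⟩
    · split_ifs with h <;> omega
    · omega
    · have : (j + (m + 1) + 2) / 3 = (j + m) / 3 + 1 := by omega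
      simp [this]

theorem pvOuterA (header : List String) (M : Nat) :
    (List.range M).foldl
      (fun st _ => (List.range header.length).foldl (pvStepA header) st) (0, 0, [])
    = ((((M * header.length) % 3 : Nat) : Int), (((M * header.length + 2) / 3 : Nat) : Int),
       (List.range (M * header.length)).map
         (fun j => header.getD (j % header.length) "" ++ "_" ++
            PySem.Int.toStr (((j / 3 + 1 : Nat)) : Int))) := by
  induction M with
  | zero => simp
  | succ M ih =>
    rw [List.range_succ, List.foldl_append, ih]
    simp only [List.foldl_cons, List.foldl_nil]
    rw [pvInnerA header header.length (M * header.length)]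
    have hsplit : (M + 1) * header.length = M * header.length + header.length := by ring
    refine Prod.ext (by rw [hsplit]) (Prod.ext (by rw [hsplit]) ?_)
    simp only [hsplit, List.range_add, List.map_append, List.map_map]
    congr 1
    refine List.map_congr_left (fun i hi => ?_)
    have hi' : i < header.length := List.mem_range.mp hi
    have h1 : (M * header.length + i) % header.length = i := by
      rw [Nat.add_comm, Nat.add_mul_mod_self_right]; exact Nat.mod_eq_of_lt hi'
    simp [Function.comp, h1]

-- ===== VERDICT (by name: the statement is the Claim_ definition above) =====
theorem includeNodeNumberInHeader_spec : Claim_equal_includeNodeNumberInHeader := by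
  intro header _
  unfold Spec_includeNodeNumberInHeader includeNodeNumberInHeader includeNodeNumberInHeader_alt
  rw [pvOuterA header 8]
  refine List.map_congr_left (fun j hj => ?_)
  congr 1
  congr 1
  have h3 : PySem.Int.floordiv (j : Int) 3 = ((j / 3 : Nat) : Int) := by
    exact_mod_cast PySem.Int.floordiv_natCast j 3
  rw [h3]
  push_cast
  ring
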